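-- pv_equiv track=rewrite | github.com/sustik78/ExplainAI | ExplainAI/backend/app/utils/code_analyzer.py | summarize_logic_steps
-- ===== SOURCE A (Python) =====
-- def summarize_logic_steps(language: str, code: str) -> list[str]:
--     steps = ["Start", "Read or initialize variables"]
--     stripped_lines = [line.strip() for line in code.splitlines() if line.strip()]
--
--     for line in stripped_lines[:8]:
--         if line.startswith(("for ", "while ")):
--             steps.append("Repeat a block of logic while a condition or sequence lasts")
--         elif line.startswith("if "):
--             steps.append("Check a condition and branch based on the result")
--         elif line.startswith("return"):
--             steps.append("Return the final result")
--         elif line.startswith(("def ", "function ", "class ")):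
--             steps.append("Define program structure")
--         else:
--             steps.append(f"Execute: {line[:48]}")
--
--     if steps[-1] != "Return the final result":
--         steps.append("Produce output")
--     steps.append("End")
--     return _dedupe_steps(steps)
--
-- def _dedupe_steps(steps: list[str]) -> list[str]:
--     deduped: list[str] = []
--     for step in steps:
--         if not deduped or deduped[-1] != step:
--             deduped.append(step)
--     return deduped
-- ===== SOURCE B (Python) =====
-- def _classify(line: str) -> str:
--     if line.startswith("for ") or line.startswith("while "):
--         return "Repeat a block of logic while a condition or sequence lasts"
--     if line.startswith("if "):
--         return "Check a condition and branch based on the result"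
--     if line.startswith("return"):
--         return "Return the final result"
--     if line.startswith("def ") or line.startswith("function ") or line.startswith("class "):
--         return "Define program structure"
--     return "Execute: " + line[:48]
--
--
-- def _push(out: list[str], step: str) -> list[str]:
--     if out and out[-1] == step:
--         return out
--     return out + [step]
--
--
-- def summarize_logic_steps(language: str, code: str) -> list[str]:
--     out = _push(_push([], "Start"), "Read or initialize variables")
--     taken = 0
--     for raw in code.splitlines():
--         line = raw.strip()
--         if not line:
--             continue
--         if taken == 8:
--             break
--         taken += 1
--         out = _push(out, _classify(line))
--     if out[-1] != "Return the final result":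
--         out = _push(out, "Produce output")
--     return _push(out, "End")
-- ===== Notes on version B (the rewrite author's own statement) =====
-- stated objective: simpler
-- what changed: Fuses A's build-then-dedupe two-pass design into a single streaming pass: each step is appended through an adjacent-dedupe push as it is produced, the intermediate full steps list and the separate _dedupe_steps pass disappear, and the first-8-nonempty-lines selection is done with a counter and early break instead of a comprehension plus slice.
import Mathlib
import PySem

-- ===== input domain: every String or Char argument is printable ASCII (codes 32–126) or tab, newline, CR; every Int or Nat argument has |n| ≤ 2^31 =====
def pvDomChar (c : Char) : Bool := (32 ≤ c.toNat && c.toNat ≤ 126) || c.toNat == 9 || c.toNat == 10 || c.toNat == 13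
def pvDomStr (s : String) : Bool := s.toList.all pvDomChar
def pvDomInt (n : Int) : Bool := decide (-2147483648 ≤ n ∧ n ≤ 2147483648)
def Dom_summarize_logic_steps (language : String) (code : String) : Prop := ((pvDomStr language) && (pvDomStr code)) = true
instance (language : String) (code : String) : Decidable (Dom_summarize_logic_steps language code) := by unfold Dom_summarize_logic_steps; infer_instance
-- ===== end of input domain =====

-- B fuses A's build-then-dedupe two passes into one streaming pass with an adjacent-dedupe push; same output, objective: simpler.

-- ===== PORT A =====
-- helper _dedupe_steps of A
def dedupe_steps (steps : List String) : List String :=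
  steps.foldl
    (fun deduped step =>
      if deduped = [] || PySem.List.pyGetD deduped (-1) "" ≠ step then deduped ++ [step]
      else deduped)
    []

def summarize_logic_steps (language : String) (code : String) : List String :=
  let steps : List String := ["Start", "Read or initialize variables"]
  let stripped_lines : List String :=
    (PySem.Str.splitlines code).filterMap
      (fun line => let s := PySem.Str.strip line; if s ≠ "" then some s else none)
  let steps :=
    (PySem.List.slice stripped_lines none (some 8)).foldl
      (fun steps line =>
        steps ++
          [if PySem.Str.startswith line "for " || PySem.Str.startswith line "while " then
             "Repeat a block of logic while a condition or sequence lasts"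
           else if PySem.Str.startswith line "if " then
             "Check a condition and branch based on the result"
           else if PySem.Str.startswith line "return" then
             "Return the final result"
           else if PySem.Str.startswith line "def " || PySem.Str.startswith line "function " ||
               PySem.Str.startswith line "class " then
             "Define program structure"
           else
             "Execute: " ++ PySem.Str.slice line none (some 48)])
      steps
  let steps :=
    if PySem.List.pyGetD steps (-1) "" ≠ "Return the final result" then steps ++ ["Produce output"]
    else steps
  let steps := steps ++ ["End"]
  dedupe_steps steps

-- ===== PORT B =====
-- helper _classify of B
def altClassify (line : String) : String :=
  if PySem.Str.startswith line "for " || PySem.Str.startswith line "while " then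
    "Repeat a block of logic while a condition or sequence lasts"
  else if PySem.Str.startswith line "if " then
    "Check a condition and branch based on the result"
  else if PySem.Str.startswith line "return" then
    "Return the final result"
  else if PySem.Str.startswith line "def " || PySem.Str.startswith line "function " ||
      PySem.Str.startswith line "class " then
    "Define program structure"
  else
    "Execute: " ++ PySem.Str.slice line none (some 48)

-- helper _push of B (adjacent dedupe on append)
def altPush (out : List String) (step : String) : List String :=
  if out ≠ [] && out.getLast? = some step then out else out ++ [step]

-- B's for-loop over the raw lines, with the counter and the break at 8
def altLoop : List String → Nat → List String → List String
  | [], _, out => out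
  | raw :: rest, taken, out =>
    let line := PySem.Str.strip raw
    if line = "" then altLoop rest taken out
    else if taken = 8 then out
    else altLoop rest (taken + 1) (altPush out (altClassify line))

def summarize_logic_steps_alt (language : String) (code : String) : List String :=
  let out := altPush (altPush [] "Start") "Read or initialize variables"
  let out := altLoop (PySem.Str.splitlines code) 0 out
  let out :=
    if out.getLast? ≠ some "Return the final result" then altPush out "Produce output" else out
  altPush out "End"

-- ===== PRECONDITION & SPEC =====
def Spec_summarize_logic_steps (language : String) (code : String) (out : List String) : Prop := out = summarize_logic_steps_alt language code
instance (language : String) (code : String) (out : List String) : Decidable (Spec_summarize_logic_steps language code out) := by unfold Spec_summarize_logic_steps; infer_instance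

-- ===== CLAIM (what is proved, stated in full; the proofs are below) =====
def Claim_equal_summarize_logic_steps : Prop := ∀ (language : String) (code : String), Dom_summarize_logic_steps language code → Spec_summarize_logic_steps language code (summarize_logic_steps language code)

-- ===== LEMMAS AND PROOFS =====

theorem pyGetD_neg_one_eq_getLast? (l : List String) (h : l ≠ []) :
    PySem.List.pyGetD l (-1) "" = l.getLast?.getD "" := by
  rcases l.eq_nil_or_concat with rfl | ⟨ys, y, rfl⟩
  · exact absurd rfl h
  · simp only [List.concat_eq_append]
    simp [PySem.List.pyGetD_neg_one_append_singleton]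

-- A's dedupe step equals B's push
theorem dedupeStep_eq_altPush (d : List String) (s : String) :
    (if d = [] || PySem.List.pyGetD d (-1) "" ≠ s then d ++ [s] else d) = altPush d s := by
  rcases d.eq_nil_or_concat with rfl | ⟨ys, y, rfl⟩
  · simp [altPush]
  · simp only [List.concat_eq_append]
    rw [PySem.List.pyGetD_neg_one_append_singleton]
    by_cases he : y = s <;> simp [altPush, he]

theorem altPush_getLast? (d : List String) (s : String) : (altPush d s).getLast? = some s := by
  unfold altPush
  split
  · next h =>
    simp only [Bool.and_eq_true, ne_eq, decide_eq_true_eq] at h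
    exact h.2
  · simp

-- the last element of a fold of pushes over a nonempty list is the list's last element
theorem getLast?_foldl_altPush (l : List String) (acc : List String) (h : l ≠ []) :
    (l.foldl altPush acc).getLast? = l.getLast? := by
  induction l generalizing acc with
  | nil => exact absurd rfl h
  | cons x xs ih =>
    cases xs with
    | nil => simp [altPush_getLast?]
    | cons y ys =>
      rw [List.foldl_cons, ih _ (by simp)]
      simp

-- folding A's dedupe step over l₁ ++ l₂ = folding B's push over l₂ starting from the fold of l₁
theorem foldl_dedupe_eq_altPush (l acc : List String) :
    l.foldl (fun d s => if d = [] || PySem.List.pyGetD d (-1) "" ≠ s then d ++ [s] else d) acc =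
      l.foldl altPush acc := by
  induction l generalizing acc with
  | nil => rfl
  | cons x xs ih => rw [List.foldl_cons, List.foldl_cons, dedupeStep_eq_altPush]; exact ih _

-- B's loop = push-fold over the classified first (8 - taken) nonempty stripped lines
theorem altLoop_eq_foldl (lines : List String) (taken : Nat) (out : List String)
    (h : taken ≤ 8) :
    altLoop lines taken out =
      ((((lines.filterMap
            (fun line => let s := PySem.Str.strip line; if s ≠ "" then some s else none)).take
          (8 - taken)).map altClassify).foldl altPush out) := by
  induction lines generalizing taken out with
  | nil => simp [altLoop]
  | cons raw rest ih =>
    rw [show altLoop (raw :: rest) taken out =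
        (if PySem.Str.strip raw = "" then altLoop rest taken out
         else if taken = 8 then out
         else altLoop rest (taken + 1) (altPush out (altClassify (PySem.Str.strip raw)))) from rfl]
    simp only [List.filterMap_cons]
    by_cases hs : PySem.Str.strip raw = ""
    · rw [if_pos hs, ih taken out h]
      simp [hs]
    · rw [if_neg hs,
        show (let s := PySem.Str.strip raw; if s ≠ "" then some s else none) =
          some (PySem.Str.strip raw) by simp [hs]]
      by_cases ht : taken = 8
      · subst ht
        simp
      · rw [if_neg ht, ih (taken + 1) _ (by omega)]
        rw [show 8 - taken = (8 - (taken + 1)) + 1 by omega,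
          List.take_succ_cons, List.map_cons, List.foldl_cons]

theorem summarize_logic_steps_eq (language code : String) :
    summarize_logic_steps language code = summarize_logic_steps_alt language code := by
  simp only [summarize_logic_steps, summarize_logic_steps_alt]
  set stripped :=
    (PySem.Str.splitlines code).filterMap
      (fun line => let s := PySem.Str.strip line; if s ≠ "" then some s else none) with hstripped
  rw [altLoop_eq_foldl _ 0 _ (by omega)]
  rw [PySem.List.slice_to (b := 8) stripped (by norm_num)]
  rw [← hstripped]
  simp only [show ((8:Int)).toNat = 8 from rfl, Nat.sub_zero]
  -- A's classification loop builds init ++ map classify lines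
  have hbuild :
      (stripped.take 8).foldl
          (fun steps line =>
            steps ++
              [if PySem.Str.startswith line "for " || PySem.Str.startswith line "while " then
                 "Repeat a block of logic while a condition or sequence lasts"
               else if PySem.Str.startswith line "if " then
                 "Check a condition and branch based on the result"
               else if PySem.Str.startswith line "return" then
                 "Return the final result"
               else if PySem.Str.startswith line "def " || PySem.Str.startswith line "function " ||
                   PySem.Str.startswith line "class " then
                 "Define program structure"
               else
                 "Execute: " ++ PySem.Str.slice line none (some 48)])
          ["Start", "Read or initialize variables"] =
        ["Start", "Read or initialize variables"] ++ (stripped.take 8).map altClassify := by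
    rw [PySem.List.foldl_append_singleton_eq_map]
    rfl
  rw [hbuild]
  set msgs := (stripped.take 8).map altClassify with hmsgs
  have hded : ∀ (l : List String), dedupe_steps l = l.foldl altPush [] :=
    fun l => foldl_dedupe_eq_altPush l []
  have hne : (["Start", "Read or initialize variables"] ++ msgs) ≠ [] := by simp
  -- the two "Produce output" tests agree
  have hcond :
      (PySem.List.pyGetD (["Start", "Read or initialize variables"] ++ msgs) (-1) "" ≠
          "Return the final result") ↔
        ((List.foldl altPush (altPush (altPush [] "Start") "Read or initialize variables")
            msgs).getLast? ≠ some "Return the final result") := by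
    rw [pyGetD_neg_one_eq_getLast? _ hne]
    rw [show (altPush (altPush [] "Start") "Read or initialize variables") =
        List.foldl altPush [] ["Start", "Read or initialize variables"] from rfl,
      ← List.foldl_append, getLast?_foldl_altPush _ _ hne]
    cases hl : (["Start", "Read or initialize variables"] ++ msgs).getLast? with
    | none => exact absurd (List.getLast?_eq_none_iff.mp hl) hne
    | some v => constructor <;> intro h hc <;> simp_all
  by_cases hret :
      (List.foldl altPush (altPush (altPush [] "Start") "Read or initialize variables")
        msgs).getLast? ≠ some "Return the final result"
  · rw [if_pos (hcond.mpr hret), if_pos hret, hded]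
    simp only [List.foldl_append, List.foldl_cons, List.foldl_nil]
  · rw [if_neg (fun hc => hret (hcond.mp hc)), if_neg hret, hded]
    simp only [List.foldl_append, List.foldl_cons, List.foldl_nil]

-- ===== VERDICT (by name: the statement is the Claim_ definition above) =====
theorem summarize_logic_steps_spec : Claim_equal_summarize_logic_steps := by
  intro language code _
  unfold Spec_summarize_logic_steps
  exact summarize_logic_steps_eq language code
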